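-- pv_equiv track=rewrite | github.com/KonstantinosAng/CodeWars | Python/[6 kyu] Zero-plentiful Array.py | zero_plentiful
-- ===== SOURCE A (Python) =====
-- def zero_plentiful(arr):
--   if 0 in arr:
--     pointer = 0
--     length = 0
--     count = 0
--     while pointer < len(arr):
--       if arr[pointer] == 0:
--         length += 1
--       else:
--         if length >= 4:
--           count += 1
--           length = 0
--         else:
--           if length > 0: return 0
--       pointer += 1
--     if length < 4 and length > 0: return 0
--     return count if arr[-1] != 0 else count + 1
--   return 0
-- ===== SOURCE B (Python) =====
-- def zero_plentiful(arr):
--     # run-list-first: collect the lengths of maximal zero runs, then decide once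
--     runs = []
--     cur = 0
--     for x in arr:
--         if x == 0:
--             cur += 1
--         elif cur:
--             runs.append(cur)
--             cur = 0
--     if cur:
--         runs.append(cur)
--     return 0 if any(r < 4 for r in runs) else len(runs)
-- ===== Notes on version B (the rewrite author's own statement) =====
-- stated objective: simpler
-- what changed: B first collects the lengths of all maximal zero runs in one pass, then returns 0 if any run is shorter than 4 and otherwise the number of runs, replacing A's pointer/length/count state machine with mid-loop early returns and its last-element trailing-run fixup.
import Mathlib
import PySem

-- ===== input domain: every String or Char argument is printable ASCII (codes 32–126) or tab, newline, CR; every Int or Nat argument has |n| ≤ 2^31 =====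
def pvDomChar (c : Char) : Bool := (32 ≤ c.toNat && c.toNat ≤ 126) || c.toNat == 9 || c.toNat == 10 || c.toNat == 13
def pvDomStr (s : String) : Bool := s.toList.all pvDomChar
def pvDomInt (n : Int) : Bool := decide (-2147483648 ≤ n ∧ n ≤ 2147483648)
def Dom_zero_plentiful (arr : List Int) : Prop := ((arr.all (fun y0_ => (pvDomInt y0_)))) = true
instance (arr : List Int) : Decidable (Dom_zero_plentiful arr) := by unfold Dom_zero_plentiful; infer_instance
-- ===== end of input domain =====

-- B collects the zero-run lengths first and then decides once; equivalence of return values is proved (no mutation involved).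

-- ===== PORT A =====
-- A's while loop over pointer 0..len-1 reading arr[pointer]: transliterated as structural
-- recursion over the remaining suffix, carrying (length, count); `.inl r` is the mid-loop `return r`.
def zpLoopA : List Int → Int → Int → Sum Int (Int × Int)
  | [], length, count => .inr (length, count)
  | x :: rest, length, count =>
    if x = 0 then zpLoopA rest (length + 1) count
    else if length ≥ 4 then zpLoopA rest 0 (count + 1)
    else if length > 0 then .inl 0
    else zpLoopA rest length count

def zero_plentiful (arr : List Int) : Int :=
  if (0 : Int) ∈ arr then
    match zpLoopA arr 0 0 with
    | .inl r => r
    | .inr (length, count) =>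
      if length < 4 ∧ length > 0 then 0
      else
        -- arr[-1]: arr is nonempty here (it contains 0), so pyGet? is some; getD 0 is unreachable
        if (PySem.List.pyGet? arr (-1)).getD 0 ≠ 0 then count else count + 1
  else 0

-- ===== PORT B =====
-- the one pass of Source B building `runs` (lengths of maximal zero runs, in order), `cur` is the open run
def zpRuns : List Int → Int → List Int
  | [], cur => if cur > 0 then [cur] else []
  | x :: rest, cur =>
    if x = 0 then zpRuns rest (cur + 1)
    else if cur > 0 then cur :: zpRuns rest 0
    else zpRuns rest cur

def zero_plentiful_alt (arr : List Int) : Int :=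
  let runs := zpRuns arr 0
  if runs.any (fun r => decide (r < 4)) then 0 else (runs.length : Int)

-- ===== PRECONDITION & SPEC =====
def Spec_zero_plentiful (arr : List Int) (out : Int) : Prop := out = zero_plentiful_alt arr
instance (arr : List Int) (out : Int) : Decidable (Spec_zero_plentiful arr out) := by unfold Spec_zero_plentiful; infer_instance

-- ===== CLAIM (what is proved, stated in full; the proofs are below) =====
def Claim_equal_zero_plentiful : Prop := ∀ (arr : List Int), Dom_zero_plentiful arr → Spec_zero_plentiful arr (zero_plentiful arr)

-- ===== LEMMAS AND PROOFS =====

-- loop invariant for A: the final `length` is nonnegative and positive exactly when the suffix ends in 0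
-- (or, for the empty suffix, when the incoming `length` is positive)
theorem zpLoopA_inv (l : List Int) (length count len cnt : Int) (h0 : 0 ≤ length)
    (h : zpLoopA l length count = .inr (len, cnt)) :
    0 ≤ len ∧ ((l = [] ∧ len = length) ∨ (l ≠ [] ∧ (0 < len ↔ l.getLast? = some 0))) := by
  induction l generalizing length count with
  | nil => simp [zpLoopA] at h; exact ⟨h.1 ▸ h0, Or.inl ⟨rfl, h.1.symm⟩⟩
  | cons x rest ih =>
    simp only [zpLoopA] at h
    have hlast : ∀ y (r : List Int), r ≠ [] → (y :: r).getLast? = r.getLast? := by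
      intro y r hr
      cases r with
      | nil => exact absurd rfl hr
      | cons a b => simp [List.getLast?_cons_cons]
    split_ifs at h with hx h4 hp
    · -- x = 0
      rcases ih (length + 1) count (by omega) h with ⟨hlen, hc⟩
      refine ⟨hlen, Or.inr ⟨by simp, ?_⟩⟩
      rcases hc with ⟨hr, he⟩ | ⟨hr, hiff⟩
      · subst hr; simp [hx, he]; omega
      · rw [hlast x rest hr]; exact hiff
    · rcases ih 0 (count + 1) le_rfl h with ⟨hlen, hc⟩
      refine ⟨hlen, Or.inr ⟨by simp, ?_⟩⟩
      rcases hc with ⟨hr, he⟩ | ⟨hr, hiff⟩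
      · subst hr; simp [hx, he]
      · rw [hlast x rest hr]; exact hiff
    · rcases ih length count h0 h with ⟨hlen, hc⟩
      refine ⟨hlen, Or.inr ⟨by simp, ?_⟩⟩
      rcases hc with ⟨hr, he⟩ | ⟨hr, hiff⟩
      · subst hr; simp [hx, he]; omega
      · rw [hlast x rest hr]; exact hiff

-- the heart of the equivalence: A's loop (with its final fixup read off the final length)
-- computes B's run-list criterion, for every suffix and every accumulated state
theorem zpLoopA_eq_runs (l : List Int) (length count : Int) (h0 : 0 ≤ length) :
    (match zpLoopA l length count with
     | .inl r => r
     | .inr (len, cnt) => if len ≥ 4 then cnt + 1 else if len > 0 then 0 else cnt)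
    = (if (zpRuns l length).any (fun r => decide (r < 4)) then 0
       else count + ((zpRuns l length).length : Int)) := by
  induction l generalizing length count with
  | nil =>
    simp only [zpLoopA, zpRuns]
    split_ifs with hp h4 h4' hp' <;> simp_all <;> omega
  | cons x rest ih =>
    by_cases hx : x = 0
    · simp only [zpLoopA, zpRuns, if_pos hx]
      exact ih (length + 1) count (by omega)
    · by_cases h4 : length ≥ 4
      · have hp : length > 0 := by omega
        simp only [zpLoopA, zpRuns, if_neg hx, if_pos h4, if_pos hp]
        rw [ih 0 (count + 1) le_rfl]
        have h4' : ¬ (length < 4) := by omega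
        simp only [List.any_cons, h4', decide_false, Bool.false_or, List.length_cons]
        split_ifs <;> push_cast <;> try ring
      · by_cases hp : length > 0
        · simp only [zpLoopA, zpRuns, if_neg hx, if_neg h4, if_pos hp]
          have h4' : length < 4 := by omega
          simp [h4']
        · have hl0 : ¬ (length > 0) := hp
          simp only [zpLoopA, zpRuns, if_neg hx, if_neg h4, if_neg hp]
          exact ih length count h0

-- ===== VERDICT (by name: the statement is the Claim_ definition above) =====
theorem zero_plentiful_spec : Claim_equal_zero_plentiful := by
  intro arr hdom
  clear hdom
  show zero_plentiful arr = zero_plentiful_alt arr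
  unfold zero_plentiful zero_plentiful_alt
  by_cases hmem : (0 : Int) ∈ arr
  · simp only [hmem, if_true]
    have key := zpLoopA_eq_runs arr 0 0 le_rfl
    cases hres : zpLoopA arr 0 0 with
    | inl r =>
      rw [hres] at key
      simpa using key
    | inr p =>
      obtain ⟨len, cnt⟩ := p
      rw [hres] at key
      have hne : arr ≠ [] := by rintro rfl; simp at hmem
      rcases zpLoopA_inv arr 0 0 len cnt le_rfl hres with ⟨hlen, hc⟩
      rcases hc with ⟨hnil, _⟩ | ⟨_, hiff⟩
      · exact absurd hnil hne
      · rw [PySem.List.pyGet?_neg_one]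
        dsimp only
        simp only [zero_add] at key
        by_cases h4 : len ≥ 4
        · -- trailing run ≥ 4: last element is 0, A returns cnt + 1
          rw [if_pos h4] at key
          have hlast : arr.getLast? = some 0 := hiff.mp (by omega)
          rw [if_neg (by omega : ¬ (len < 4 ∧ len > 0)), hlast]
          simpa using key
        · by_cases hp : len > 0
          · -- trailing run 0 < len < 4: A returns 0
            rw [if_neg h4, if_pos hp] at key
            rw [if_pos (⟨by omega, hp⟩ : len < 4 ∧ len > 0)]
            exact key
          · -- len = 0: last element nonzero, A returns cnt
            rw [if_neg h4, if_neg hp] at key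
            have hl : arr.getLast? ≠ some 0 := fun h => hp (hiff.mpr h)
            rw [if_neg (by omega : ¬ (len < 4 ∧ len > 0))]
            cases h : arr.getLast? with
            | none => exact absurd (List.getLast?_eq_none_iff.mp h) hne
            | some v =>
              rw [h] at hl
              have hv : v ≠ 0 := fun hv => hl (by rw [hv])
              simp only [Option.getD_some]
              rw [if_pos hv]
              exact key
  · simp only [hmem, if_false]
    have hruns : ∀ l : List Int, (0 : Int) ∉ l → zpRuns l 0 = [] := by
      intro l
      induction l with
      | nil => intro _; simp [zpRuns]
      | cons x rest ih =>
        intro hm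
        simp only [List.mem_cons, not_or] at hm
        rw [zpRuns, if_neg (fun h => hm.1 h.symm), if_neg (by omega)]
        exact ih hm.2
    simp [hruns arr hmem]
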